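-- pv_equiv track=rewrite | github.com/joce/AoC2024-py | src/day07.py | try_all2
-- ===== SOURCE A (Python) =====
-- def try_all2(lst: list[int]) -> list[int]:
--     if len(lst) == 1:
--         return [lst[0]]
--     return (
--         try_all2([lst[0] + lst[1]] + lst[2:])
--         + try_all2([lst[0] * lst[1]] + lst[2:])
--         + try_all2([int(str(lst[0]) + str(lst[1]))] + lst[2:])  # yuk :-/
--     )
-- ===== SOURCE B (Python) =====
-- def try_all2(lst: list[int]) -> list[int]:
--     acc = [lst[0]]
--     for n in lst[1:]:
--         acc = [r for v in acc for r in (v + n, v * n, int(str(v) + str(n)))]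
--     return acc
-- ===== Notes on version B (the rewrite author's own statement) =====
-- stated objective: alternative
-- what changed: Replaces the ternary tree recursion (which rebuilds a sliced list on every call) with a single iterative left-fold that keeps the list of all partial results and expands each by +, * and concat per remaining number.
-- outside the precondition, e.g. on try_all2([]): A raises IndexError, B raises IndexError; on try_all2([2, -3]): A raises ValueError, B raises ValueError
import Mathlib
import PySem

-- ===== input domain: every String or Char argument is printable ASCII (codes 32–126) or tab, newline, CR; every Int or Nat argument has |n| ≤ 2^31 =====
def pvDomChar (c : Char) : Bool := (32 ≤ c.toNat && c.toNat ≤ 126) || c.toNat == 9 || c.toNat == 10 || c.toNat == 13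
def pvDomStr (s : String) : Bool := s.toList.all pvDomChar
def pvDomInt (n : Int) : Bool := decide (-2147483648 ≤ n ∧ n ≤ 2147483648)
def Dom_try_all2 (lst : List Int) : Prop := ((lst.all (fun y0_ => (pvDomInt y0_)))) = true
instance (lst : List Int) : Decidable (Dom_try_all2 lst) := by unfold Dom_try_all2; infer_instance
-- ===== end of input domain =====

-- ===== PORT A =====
-- B rewrites A's ternary tree recursion as an iterative left-fold over the list (different decomposition, same cost).
-- int(str(v) + str(n)): exact where the concatenated string parses; Pre_ excludes the ValueError inputs (negative later element), on which .getD 0 is never reached inside Pre_.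
def pyCat (v n : Int) : Int := (PySem.Int.ofStr? (PySem.Int.toStr v ++ PySem.Int.toStr n)).getD 0

def try_all2 (lst : List Int) : List Int :=
  match lst with
  | [] => []          -- Python: lst[0] raises IndexError; excluded by Pre_
  | [a] => [a]
  | a :: b :: rest =>
      try_all2 ((a + b) :: rest)
        ++ try_all2 ((a * b) :: rest)
        ++ try_all2 (pyCat a b :: rest)
termination_by lst.length

-- ===== PORT B =====
def try_all2_alt (lst : List Int) : List Int :=
  match lst with
  | [] => []          -- Python: lst[0] raises IndexError; excluded by Pre_
  | a :: rest =>
      rest.foldl (fun acc n => acc.flatMap (fun v => [v + n, v * n, pyCat v n])) [a]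

-- ===== PRECONDITION & SPEC =====
-- Pre_ excludes the empty list (A raises IndexError) and lists whose tail contains a negative
-- number (the concat branch int(str(v)+str(n)) raises ValueError on e.g. "2-3").
def Pre_try_all2 (lst : List Int) : Prop := lst ≠ [] ∧ ∀ x ∈ lst.tail, 0 ≤ x
instance (lst : List Int) : Decidable (Pre_try_all2 lst) := by unfold Pre_try_all2; infer_instance
def pvWitness_try_all2 : List Int := [2, 3, 5]
def Spec_try_all2 (lst : List Int) (out : List Int) : Prop := out = try_all2_alt lst
instance (lst : List Int) (out : List Int) : Decidable (Spec_try_all2 lst out) := by unfold Spec_try_all2; infer_instance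

-- ===== CLAIM (what is proved, stated in full; the proofs are below) =====
def Claim_equal_try_all2 : Prop := ∀ (lst : List Int), Dom_try_all2 lst → Pre_try_all2 lst → Spec_try_all2 lst (try_all2 lst)

-- ===== LEMMAS AND PROOFS =====
def pvStep (acc : List Int) (n : Int) : List Int :=
  acc.flatMap (fun v => [v + n, v * n, pyCat v n])

theorem pvStep_append (xs ys : List Int) (n : Int) :
    pvStep (xs ++ ys) n = pvStep xs n ++ pvStep ys n := by
  simp [pvStep, List.flatMap_append]

theorem foldl_pvStep_append (rest : List Int) (xs ys : List Int) :
    rest.foldl pvStep (xs ++ ys) = rest.foldl pvStep xs ++ rest.foldl pvStep ys := by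
  induction rest generalizing xs ys with
  | nil => simp
  | cons n rs ih => simp [List.foldl_cons, pvStep_append, ih]

theorem try_all2_eq_foldl (rest : List Int) (a : Int) :
    try_all2 (a :: rest) = rest.foldl pvStep [a] := by
  induction rest generalizing a with
  | nil => simp [try_all2]
  | cons b rs ih =>
      have h : pvStep [a] b = [a + b] ++ [a * b] ++ [pyCat a b] := by
        simp [pvStep]
      rw [try_all2, List.foldl_cons, h, foldl_pvStep_append, foldl_pvStep_append,
        ih, ih, ih]

-- ===== VERDICT (by name: the statement is the Claim_ definition above) =====
theorem try_all2_spec : Claim_equal_try_all2 := by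
  intro lst _ hpre
  unfold Spec_try_all2
  match lst with
  | [] => exact absurd rfl hpre.1
  | a :: rest =>
      simp only [try_all2_alt]
      exact try_all2_eq_foldl rest a
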